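-- pv_equiv track=rewrite | github.com/kimhojun2/Algorithm | 프로그래머스/2/87390. n＾2 배열 자르기/n＾2 배열 자르기.py | solution
-- ===== SOURCE A (Python) =====
-- def solution(n, left, right):
--     answer = []
--     R = left // n
--     C = left % n
--
--     while left <= right:
--
--         answer.append(max(R, C) + 1)
--
--         C += 1
--
--         if C == n:
--             C = 0
--             R += 1
--
--         left += 1
--
--     return answer
-- ===== SOURCE B (Python) =====
-- def solution(n, left, right):
--     # Row-block construction: row r of the n x n array is (r+1) repeated (r+1)
--     # times followed by r+2, ..., n; emit, row by row, the part of that row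
--     # that the window [left, right] needs (without materializing whole rows).
--     answer = []
--     q0 = left // n
--     q1 = right // n
--     for r in range(q0, q1 + 1):
--         lo = left - r * n if r == q0 else 0
--         hi = right - r * n + 1 if r == q1 else n
--         answer += [r + 1] * (min(hi, r + 1) - min(lo, r + 1)) \
--             + list(range(max(lo, r + 1) + 1, max(hi, r + 1) + 1))
--     return answer
-- ===== Notes on version B (the rewrite author's own statement) =====
-- stated objective: alternative
-- what changed: Replaces A's element-by-element while loop with carry counters by a row-block construction: iterate over the rows of the n x n array that [left,right] touches, build each row once from its closed form ((r+1) repeated r+1 times, then r+2..n), and append the needed slice of it.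
-- outside the precondition, e.g. on solution(-3, 0, 2): A returns [1, 2, 3], B returns []
import Mathlib
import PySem

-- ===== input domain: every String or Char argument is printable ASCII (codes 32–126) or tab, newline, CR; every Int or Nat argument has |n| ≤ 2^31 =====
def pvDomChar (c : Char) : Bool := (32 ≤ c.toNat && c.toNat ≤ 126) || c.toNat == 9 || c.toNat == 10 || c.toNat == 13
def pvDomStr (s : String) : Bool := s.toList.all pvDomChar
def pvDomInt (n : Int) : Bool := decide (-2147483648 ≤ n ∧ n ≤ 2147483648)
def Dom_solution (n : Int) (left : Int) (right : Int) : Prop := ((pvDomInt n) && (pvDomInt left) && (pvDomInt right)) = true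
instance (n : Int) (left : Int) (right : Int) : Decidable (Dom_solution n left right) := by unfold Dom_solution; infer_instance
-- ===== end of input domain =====

-- B replaces A's element-by-element carry-counter loop by a row-block construction:
-- emit, row by row, the needed part of each touched row from its closed form (objective: alternative).

-- ===== PORT A =====
-- the while loop of A: state (R, C, left), appending max(R,C)+1 each step
def solutionLoop (n : Int) (R : Int) (C : Int) (left : Int) (right : Int) : List Int :=
  if left ≤ right then
    let a := max R C + 1
    let C1 := C + 1
    let RC := if C1 = n then ((0 : Int), R + 1) else (C1, R)
    a :: solutionLoop n RC.2 RC.1 (left + 1) right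
  else []
termination_by (right + 1 - left).toNat
decreasing_by omega

def solution (n : Int) (left : Int) (right : Int) : List Int :=
  solutionLoop n (PySem.Int.floordiv left n) (PySem.Int.mod left n) left right

-- ===== PORT B =====
-- '[r + 1] * (min(hi, r + 1) - min(lo, r + 1)) + list(range(max(lo, r + 1) + 1, max(hi, r + 1) + 1))'
def bSeg (r : Int) (lo : Int) (hi : Int) : List Int :=
  List.replicate (min hi (r + 1) - min lo (r + 1)).toNat (r + 1) ++
    PySem.List.pyRange (max lo (r + 1) + 1) (max hi (r + 1) + 1)

def solution_alt (n : Int) (left : Int) (right : Int) : List Int :=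
  let q0 := PySem.Int.floordiv left n
  let q1 := PySem.Int.floordiv right n
  (PySem.List.pyRange q0 (q1 + 1)).foldl
    (fun answer r =>
      let lo := if r = q0 then left - r * n else 0
      let hi := if r = q1 then right - r * n + 1 else n
      answer ++ bSeg r lo hi) []

-- ===== PRECONDITION & SPEC =====
-- Pre_ excludes n ≤ 0: at n = 0 A raises ZeroDivisionError, and for n < 0 the carry test
-- 'C == n' can never fire, so A's output is an accident of its counters, unrelated to any n×n array.
def Pre_solution (n : Int) (left : Int) (right : Int) : Prop := 1 ≤ n
instance (n : Int) (left : Int) (right : Int) : Decidable (Pre_solution n left right) := by unfold Pre_solution; infer_instance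

def pvWitness_solution : Int × Int × Int := (3, 2, 5)

def Spec_solution (n : Int) (left : Int) (right : Int) (out : List Int) : Prop := out = solution_alt n left right
instance (n : Int) (left : Int) (right : Int) (out : List Int) : Decidable (Spec_solution n left right out) := by unfold Spec_solution; infer_instance

-- ===== CLAIM (what is proved, stated in full; the proofs are below) =====
def Claim_equal_solution : Prop := ∀ (n : Int) (left : Int) (right : Int), Dom_solution n left right → Pre_solution n left right → Spec_solution n left right (solution n left right)

-- ===== LEMMAS AND PROOFS =====

-- the flat-index view of one loop step of A: the carry branch is exactly the divmod step
lemma divmod_step (n i : Int) (hn : 1 ≤ n) :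
    (if PySem.Int.mod i n + 1 = n then ((0 : Int), PySem.Int.floordiv i n + 1)
     else (PySem.Int.mod i n + 1, PySem.Int.floordiv i n)) =
    (PySem.Int.mod (i + 1) n, PySem.Int.floordiv (i + 1) n) := by
  have h0 : (0 : Int) < n := by omega
  rw [PySem.Int.floordiv_eq_ediv_of_pos h0, PySem.Int.floordiv_eq_ediv_of_pos h0,
      PySem.Int.mod_eq_emod_of_pos h0, PySem.Int.mod_eq_emod_of_pos h0]
  have hmn : 0 ≤ i % n := Int.emod_nonneg i (by omega)
  have hml : i % n < n := Int.emod_lt_of_pos i h0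
  have heq : n * (i / n) + i % n = i := by
    have := Int.mul_ediv_add_emod i n; linarith
  by_cases h : i % n + 1 = n
  · have hu : (i + 1) / n = i / n + 1 ∧ (i + 1) % n = 0 :=
      (Int.ediv_emod_unique h0).2 ⟨by linarith, le_refl 0, h0⟩
    simp [h, hu.1, hu.2]
  · have hu : (i + 1) / n = i / n ∧ (i + 1) % n = i % n + 1 :=
      (Int.ediv_emod_unique h0).2 ⟨by linarith, by omega, by omega⟩
    simp [h, hu.1, hu.2]

-- A's loop is the per-flat-index map
lemma loop_eq_map (n : Int) (hn : 1 ≤ n) (left right : Int) :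
    solutionLoop n (PySem.Int.floordiv left n) (PySem.Int.mod left n) left right =
    (PySem.List.pyRange left (right + 1)).map
      (fun i => max (PySem.Int.floordiv i n) (PySem.Int.mod i n) + 1) := by
  by_cases h : left ≤ right
  · rw [solutionLoop, if_pos h]
    rw [PySem.List.pyRange_one_cons (by omega : left < right + 1)]
    simp only [List.map_cons]
    refine congrArg (fun l => _ :: l) ?_
    have hstep := divmod_step n left hn
    have : (if PySem.Int.mod left n + 1 = n then ((0:Int), PySem.Int.floordiv left n + 1)
            else (PySem.Int.mod left n + 1, PySem.Int.floordiv left n)) =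
           (PySem.Int.mod (left + 1) n, PySem.Int.floordiv (left + 1) n) := hstep
    rw [this]
    exact loop_eq_map n hn (left + 1) right
  · rw [solutionLoop, if_neg h]
    rw [PySem.List.pyRange]
    simp [show ¬ left < right + 1 from by omega]
termination_by (right + 1 - left).toNat
decreasing_by omega

lemma pyRange_nil (a b : Int) (h : b ≤ a) : PySem.List.pyRange a b = [] := by
  rw [PySem.List.pyRange]; simp [show ¬ a < b from by omega]

lemma pyRange_shift (s : Int) : ∀ (k : Nat) (a : Int),
    PySem.List.pyRange (a + s) (a + s + k) = (PySem.List.pyRange a (a + k)).map (· + s) := by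
  intro k
  induction k with
  | zero => intro a; simp
  | succ k ih =>
      intro a
      push_cast
      rw [PySem.List.pyRange_one_cons (by omega : a + s < a + s + ((k : Int) + 1)),
          PySem.List.pyRange_one_cons (by omega : a < a + ((k : Int) + 1))]
      simp only [List.map_cons]
      have := ih (a + 1)
      push_cast at this
      rw [show a + 1 + s + (k : Int) = a + s + ((k : Int) + 1) by ring,
          show a + 1 + (k : Int) = a + ((k : Int) + 1) by ring,
          show a + 1 + s = a + s + 1 by ring] at this
      rw [this]

lemma pyRange_shift' (a b s : Int) :
    PySem.List.pyRange (a + s) (b + s) = (PySem.List.pyRange a b).map (· + s) := by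
  by_cases h : a ≤ b
  · have hb : b = a + ((b - a).toNat : Int) := by omega
    rw [hb, show a + ((b - a).toNat : Int) + s = a + s + ((b - a).toNat : Int) by ring]
    exact pyRange_shift s (b - a).toNat a
  · rw [pyRange_nil _ _ (by omega), pyRange_nil _ _ (by omega)]; rfl

-- B's closed-form row segment is the per-cell map over the column range [lo, hi)
lemma bSeg_eq (r lo hi : Int) :
    bSeg r lo hi = (PySem.List.pyRange lo hi).map (fun c => max r c + 1) := by
  unfold bSeg
  by_cases hlh : lo ≤ hi
  · set p := min (max lo (r + 1)) hi with hp
    rw [PySem.List.pyRange_one_append lo p hi (by omega) (by omega), List.map_append]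
    congr 1
    · -- the constant prefix of the row
      have hc : ∀ c ∈ PySem.List.pyRange lo p, (fun c => max r c + 1) c = r + 1 := by
        intro c hc
        have := (PySem.List.mem_pyRange_one).1 hc
        simp only []
        omega
      rw [List.map_congr_left hc, List.map_const', PySem.List.length_pyRange_one]
      congr 1
      omega
    · -- the increasing tail of the row
      have hc : ∀ c ∈ PySem.List.pyRange p hi, (fun c => max r c + 1) c = c + 1 := by
        intro c hc
        have := (PySem.List.mem_pyRange_one).1 hc
        simp only []
        omega
      rw [List.map_congr_left hc, ← pyRange_shift' p hi 1]
      by_cases h2 : r + 1 ≤ hi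
      · rw [show max lo (r + 1) + 1 = p + 1 by omega, show max hi (r + 1) + 1 = hi + 1 by omega]
      · rw [pyRange_nil (p + 1) (hi + 1) (by omega),
            pyRange_nil (max lo (r + 1) + 1) (max hi (r + 1) + 1) (by omega)]
  · rw [pyRange_nil lo hi (by omega), List.map_nil,
        pyRange_nil (max lo (r + 1) + 1) (max hi (r + 1) + 1) (by omega),
        show (min hi (r + 1) - min lo (r + 1)).toNat = 0 by omega]
    rfl

-- flat indices inside row r decompose as r*n + c with c the column
lemma divmod_row (n r c : Int) (hn : 1 ≤ n) (h0 : 0 ≤ c) (hc : c < n) :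
    PySem.Int.floordiv (r * n + c) n = r ∧ PySem.Int.mod (r * n + c) n = c := by
  have hpos : (0 : Int) < n := by omega
  rw [PySem.Int.floordiv_eq_ediv_of_pos hpos, PySem.Int.mod_eq_emod_of_pos hpos]
  exact (Int.ediv_emod_unique hpos).2 ⟨by ring, h0, hc⟩

-- the flat-index map restricted to one row is the per-cell map
lemma map_f_row (n r lo hi : Int) (hn : 1 ≤ n) (h0 : 0 ≤ lo) (hhn : hi ≤ n) :
    (PySem.List.pyRange (r * n + lo) (r * n + hi)).map
      (fun i => max (PySem.Int.floordiv i n) (PySem.Int.mod i n) + 1) =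
    (PySem.List.pyRange lo hi).map (fun c => max r c + 1) := by
  rw [show r * n + lo = lo + r * n by ring, show r * n + hi = hi + r * n by ring,
      pyRange_shift' lo hi (r * n), List.map_map]
  apply List.map_congr_left
  intro c hc
  have hm := (PySem.List.mem_pyRange_one).1 hc
  have hd := divmod_row n r c hn (by omega) (by omega)
  simp only [Function.comp_apply]
  rw [show c + r * n = r * n + c by ring, hd.1, hd.2]

-- B's flat segment [a, rt] equals the concatenation of its per-row segments
lemma rows_main (n rt : Int) (hn : 1 ≤ n) : ∀ (k : Nat) (a : Int), a ≤ rt →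
    (PySem.Int.floordiv rt n - PySem.Int.floordiv a n).toNat = k →
    (PySem.List.pyRange a (rt + 1)).map
      (fun i => max (PySem.Int.floordiv i n) (PySem.Int.mod i n) + 1) =
    (PySem.List.pyRange (PySem.Int.floordiv a n) (PySem.Int.floordiv rt n + 1)).flatMap
      (fun r => bSeg r (max a (r * n) - r * n) (min (rt + 1) ((r + 1) * n) - r * n)) := by
  intro k
  induction k with
  | zero =>
      intro a ha hk
      set q := PySem.Int.floordiv a n with hq
      have hb := (PySem.Int.floordiv_eq_iff_of_pos (show (0:Int) < n by omega)).1 hq.symm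
      have hqr : q ≤ PySem.Int.floordiv rt n :=
        (PySem.Int.le_floordiv_iff_mul_le (show (0:Int) < n by omega)).2 (by omega)
      have hq1 : PySem.Int.floordiv rt n = q := by omega
      have hbr := (PySem.Int.floordiv_eq_iff_of_pos (show (0:Int) < n by omega)).1 hq1
      have hqn : (q + 1) * n = q * n + n := by ring
      rw [hq1, PySem.List.pyRange_one_cons (by omega : q < q + 1),
          pyRange_nil (q + 1) (q + 1) le_rfl]
      simp only [List.flatMap_cons, List.flatMap_nil, List.append_nil]
      rw [show max a (q * n) = a by omega, show min (rt + 1) ((q + 1) * n) = rt + 1 by omega]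
      rw [bSeg_eq q (a - q * n) (rt + 1 - q * n)]
      have hmf := map_f_row n q (a - q * n) (rt + 1 - q * n) hn (by omega) (by omega)
      rw [show q * n + (a - q * n) = a by ring, show q * n + (rt + 1 - q * n) = rt + 1 by ring]
        at hmf
      exact hmf
  | succ k ih =>
      intro a ha hk
      set q := PySem.Int.floordiv a n with hq
      have hb := (PySem.Int.floordiv_eq_iff_of_pos (show (0:Int) < n by omega)).1 hq.symm
      have hq1 : q + 1 ≤ PySem.Int.floordiv rt n := by omega
      have hA : (q + 1) * n ≤ rt :=
        (PySem.Int.le_floordiv_iff_mul_le (show (0:Int) < n by omega)).1 hq1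
      have hqn : (q + 1) * n = q * n + n := by ring
      have hq' : PySem.Int.floordiv ((q + 1) * n) n = q + 1 := by
        have := divmod_row n (q + 1) 0 hn (by omega) (by omega)
        simpa using this.1
      have hih := ih ((q + 1) * n) (by omega) (by rw [hq']; omega)
      rw [PySem.List.pyRange_one_append a ((q + 1) * n) (rt + 1) (by omega) (by omega),
          List.map_append, hih, hq',
          PySem.List.pyRange_one_cons (show q < PySem.Int.floordiv rt n + 1 by omega)]
      simp only [List.flatMap_cons]
      congr 1
      · -- first row q of the remaining segment
        rw [show max a (q * n) = a by omega,
            show min (rt + 1) ((q + 1) * n) = (q + 1) * n by omega]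
        rw [bSeg_eq q (a - q * n) ((q + 1) * n - q * n)]
        have hmf := map_f_row n q (a - q * n) ((q + 1) * n - q * n) hn (by omega) (by omega)
        rw [show q * n + (a - q * n) = a by ring,
            show q * n + ((q + 1) * n - q * n) = (q + 1) * n by ring] at hmf
        exact hmf
      · -- later rows: both start points lie at or before the row start
        apply List.flatMap_congr
        intro r hr
        have hm := (PySem.List.mem_pyRange_one).1 hr
        have hge : (q + 1) * n ≤ r * n := by nlinarith
        rw [show max ((q + 1) * n) (r * n) = r * n by omega,
            show max a (r * n) = r * n by omega]

-- ===== VERDICT (by name: the statement is the Claim_ definition above) =====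
theorem solution_spec : Claim_equal_solution := by
  intro n left right _ hpre
  have hn : (1 : Int) ≤ n := hpre
  unfold Spec_solution solution solution_alt
  rw [loop_eq_map n hn left right, PySem.List.foldl_append_eq_flatMap]
  simp only [List.nil_append]
  set q0 := PySem.Int.floordiv left n with hq0
  set q1 := PySem.Int.floordiv right n with hq1
  have hb0 := (PySem.Int.floordiv_eq_iff_of_pos (show (0:Int) < n by omega)).1 hq0.symm
  have hb1 := (PySem.Int.floordiv_eq_iff_of_pos (show (0:Int) < n by omega)).1 hq1.symm
  by_cases hlr : left ≤ right
  · rw [rows_main n right hn (q1 - q0).toNat left hlr (by rw [← hq0, ← hq1])]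
    apply List.flatMap_congr
    intro r hr
    have hm := (PySem.List.mem_pyRange_one).1 hr
    rw [← hq0, ← hq1] at hm
    have hlo : (if r = q0 then left - r * n else 0) = max left (r * n) - r * n := by
      by_cases h : r = q0
      · rw [if_pos h, h, show max left (q0 * n) = left by omega]
      · rw [if_neg h]
        have hle : q0 + 1 ≤ r := by omega
        have hmul := mul_le_mul_of_nonneg_right hle (show (0:Int) ≤ n by omega)
        have hcmp : left ≤ r * n := le_trans (le_of_lt hb0.2) hmul
        rw [show max left (r * n) = r * n by omega]
        omega
    have hhi : (if r = q1 then right - r * n + 1 else n) =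
        min (right + 1) ((r + 1) * n) - r * n := by
      by_cases h : r = q1
      · rw [if_pos h, h, show min (right + 1) ((q1 + 1) * n) = right + 1 by omega]
        ring
      · rw [if_neg h]
        have hle : r + 1 ≤ q1 := by omega
        have hmul := mul_le_mul_of_nonneg_right hle (show (0:Int) ≤ n by omega)
        have hcmp : (r + 1) * n ≤ right := le_trans hmul hb1.1
        rw [show min (right + 1) ((r + 1) * n) = (r + 1) * n by omega]
        ring
    rw [hlo, hhi]
  · -- empty output: right < left
    rw [pyRange_nil left (right + 1) (by omega), List.map_nil]
    have hq10 : q1 ≤ q0 :=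
      (PySem.Int.le_floordiv_iff_mul_le (show (0:Int) < n by omega)).2 (by omega)
    by_cases h : q1 = q0
    · rw [h] at hb1 ⊢
      rw [PySem.List.pyRange_one_cons (by omega : q0 < q0 + 1),
          pyRange_nil (q0 + 1) (q0 + 1) le_rfl]
      simp only [List.flatMap_cons, List.flatMap_nil, List.append_nil, if_true]
      rw [bSeg_eq q0 (left - q0 * n) (right - q0 * n + 1),
          pyRange_nil (left - q0 * n) (right - q0 * n + 1) (by omega), List.map_nil]
    · rw [pyRange_nil q0 (q1 + 1) (by omega)]
      simp
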